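-- pv_equiv track=rewrite | github.com/jcolinpatrick/kryptos | src/kryptos/kernel/transforms/transposition.py | unmask_block_transposition
-- ===== SOURCE A (Python) =====
-- from typing import List, Optional, Tuple
--
-- def invert_perm(perm: List[int]) -> List[int]:
--     """Compute inverse permutation. If perm[i]=j, then inv[j]=i."""
--     inv = [0] * len(perm)
--     for i, p in enumerate(perm):
--         inv[p] = i
--     return inv
--
-- BLOCK_SIZE: int = 24
--
-- def unmask_block_transposition(
--     ct: str,
--     perm: List[int],
--     cycle_boustro: bool = False,
-- ) -> str:
--     """Remove block transposition from ciphertext.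
--
--     Applies inverse permutation to BLOCK_SIZE-char blocks.
--     Remainder passes through unchanged.
--
--     If cycle_boustro is True, odd blocks use the reversed permutation.
--     """
--     inv = invert_perm(perm)
--     inv_rev = invert_perm(list(reversed(perm)))
--     out = list(ct)
--     blocks = len(ct) // BLOCK_SIZE
--
--     for block in range(blocks):
--         base = block * BLOCK_SIZE
--         use_inv = inv_rev if (cycle_boustro and block % 2 == 1) else inv
--         for j in range(BLOCK_SIZE):
--             src = base + use_inv[j]
--             if src < len(ct):
--                 out[base + j] = ct[src]
--
--     return "".join(out)
-- ===== SOURCE B (Python) =====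
-- from typing import List
--
-- BLOCK_SIZE: int = 24
--
-- def unmask_block_transposition(
--     ct: str,
--     perm: List[int],
--     cycle_boustro: bool = False,
-- ) -> str:
--     """Remove block transposition by scattering: out[base+perm[i]] = ct[base+i]."""
--     out = list(ct)
--     for block in range(len(ct) // BLOCK_SIZE):
--         base = block * BLOCK_SIZE
--         use_perm = list(reversed(perm)) if (cycle_boustro and block % 2 == 1) else perm
--         for i in range(BLOCK_SIZE):
--             out[base + use_perm[i]] = ct[base + i]
--     return "".join(out)
-- ===== Notes on version B (the rewrite author's own statement) =====
-- stated objective: simpler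
-- what changed: B drops invert_perm entirely: instead of computing two inverse permutations and gathering out[base+j] = ct[base+inv[j]] under a range guard, it directly scatters out[base+perm[i]] = ct[base+i] per block, choosing the reversed perm for odd blocks when cycle_boustro.
import Mathlib
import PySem

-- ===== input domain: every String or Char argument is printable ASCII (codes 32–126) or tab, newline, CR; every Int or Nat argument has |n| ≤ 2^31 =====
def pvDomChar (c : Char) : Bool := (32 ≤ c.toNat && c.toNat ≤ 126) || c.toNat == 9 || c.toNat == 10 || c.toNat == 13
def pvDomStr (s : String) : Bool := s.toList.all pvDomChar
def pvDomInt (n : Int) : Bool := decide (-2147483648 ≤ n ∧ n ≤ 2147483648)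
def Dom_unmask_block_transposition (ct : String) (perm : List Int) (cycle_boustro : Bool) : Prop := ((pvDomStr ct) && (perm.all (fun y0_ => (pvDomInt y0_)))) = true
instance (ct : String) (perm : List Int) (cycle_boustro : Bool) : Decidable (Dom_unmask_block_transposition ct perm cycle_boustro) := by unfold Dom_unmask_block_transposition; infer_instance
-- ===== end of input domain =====

-- B replaces A's gather through two precomputed inverse permutations by a direct per-block
-- scatter out[base+perm[i]] = ct[base+i] (objective: simpler).

-- ===== PORT A =====
def invert_perm (perm : List Int) : List Int :=
  (PySem.List.enumerate perm 0).foldl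
    (fun inv ip => PySem.List.pySetD inv ip.2 ip.1)
    (List.replicate perm.length 0)

def unmask_block_transposition (ct : String) (perm : List Int) (cycle_boustro : Bool) : String :=
  let inv := invert_perm perm
  let inv_rev := invert_perm perm.reverse
  let out0 := ct.toList
  let blocks := PySem.Int.floordiv (PySem.Str.len ct) 24
  let out := (PySem.List.pyRange 0 blocks 1).foldl (fun out block =>
    let base := block * 24
    let use_inv := if cycle_boustro && (PySem.Int.mod block 2 == 1) then inv_rev else inv
    (PySem.List.pyRange 0 24 1).foldl (fun out j =>
      let src := base + PySem.List.pyGetD use_inv j 0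
      if src < PySem.Str.len ct then
        PySem.List.pySetD out (base + j) (PySem.List.pyGetD ct.toList src ' ')
      else out) out) out0
  String.ofList out

-- ===== PORT B =====
def unmask_block_transposition_alt (ct : String) (perm : List Int) (cycle_boustro : Bool) : String :=
  let out0 := ct.toList
  let out := (PySem.List.pyRange 0 (PySem.Int.floordiv (PySem.Str.len ct) 24) 1).foldl (fun out block =>
    let base := block * 24
    let use_perm := if cycle_boustro && (PySem.Int.mod block 2 == 1) then perm.reverse else perm
    (PySem.List.pyRange 0 24 1).foldl (fun out i =>
      PySem.List.pySetD out (base + PySem.List.pyGetD use_perm i 0)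
        (PySem.List.pyGetD ct.toList (base + i) ' ')) out) out0
  String.ofList out

-- ===== PRECONDITION & SPEC =====
-- Pre_ excludes perms with an entry outside the valid index range (A's invert_perm raises IndexError there)
-- and, when ct contains at least one full block, perms that are not a permutation of range(24), on which
-- A's last-wins/negative-wraparound inverse is a defensible-corner implementation accident.
def Pre_unmask_block_transposition (ct : String) (perm : List Int) (cycle_boustro : Bool) : Prop :=
  (∀ p ∈ perm, -(perm.length : Int) ≤ p ∧ p < perm.length) ∧
  (24 ≤ ct.toList.length → perm.Perm ((List.range 24).map (fun k : Nat => (k : Int))))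

instance (ct : String) (perm : List Int) (cycle_boustro : Bool) : Decidable (Pre_unmask_block_transposition ct perm cycle_boustro) := by
  unfold Pre_unmask_block_transposition; infer_instance

def pvWitness_unmask_block_transposition : String × List Int × Bool :=
  ("abcdefghijklmnopqrstuvwxyz", [1, 0, 3, 2, 5, 4, 7, 6, 9, 8, 11, 10, 13, 12, 15, 14, 17, 16, 19, 18, 21, 20, 23, 22], true)

def Spec_unmask_block_transposition (ct : String) (perm : List Int) (cycle_boustro : Bool) (out : String) : Prop := out = unmask_block_transposition_alt ct perm cycle_boustro
instance (ct : String) (perm : List Int) (cycle_boustro : Bool) (out : String) : Decidable (Spec_unmask_block_transposition ct perm cycle_boustro out) := by unfold Spec_unmask_block_transposition; infer_instance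

-- ===== CLAIM (what is proved, stated in full; the proofs are below) =====
def Claim_equal_unmask_block_transposition : Prop := ∀ (ct : String) (perm : List Int) (cycle_boustro : Bool), Dom_unmask_block_transposition ct perm cycle_boustro → Pre_unmask_block_transposition ct perm cycle_boustro → Spec_unmask_block_transposition ct perm cycle_boustro (unmask_block_transposition ct perm cycle_boustro)

-- ===== LEMMAS AND PROOFS =====

-- generic scatter characterisation of '(range n).foldl (fun o i => o.set (f i) (c i)) out'
theorem foldl_set_length {α : Type} (n : Nat) (f : Nat → Nat) (c : Nat → α) (out : List α) :
    ((List.range n).foldl (fun o i => o.set (f i) (c i)) out).length = out.length := by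
  induction n generalizing out with
  | zero => simp
  | succ m ih => rw [List.range_succ, List.foldl_append]; simp [ih]

theorem foldl_set_miss {α : Type} (n : Nat) (f : Nat → Nat) (c : Nat → α) (out : List α) (k : Nat)
    (hk : ∀ i, i < n → f i ≠ k) :
    ((List.range n).foldl (fun o i => o.set (f i) (c i)) out)[k]? = out[k]? := by
  induction n generalizing out with
  | zero => simp
  | succ m ih =>
      rw [List.range_succ, List.foldl_append]
      simp only [List.foldl_cons, List.foldl_nil]
      rw [List.getElem?_set_ne (hk m (Nat.lt_succ_self m))]
      exact ih out (fun i hi => hk i (Nat.lt_succ_of_lt hi))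

theorem foldl_set_hit {α : Type} (n : Nat) (f : Nat → Nat) (c : Nat → α) (out : List α) (i : Nat)
    (hi : i < n) (hinj : ∀ a b, a < n → b < n → f a = f b → a = b) (hlt : f i < out.length) :
    ((List.range n).foldl (fun o j => o.set (f j) (c j)) out)[f i]? = some (c i) := by
  induction n generalizing out with
  | zero => omega
  | succ m ih =>
      rw [List.range_succ, List.foldl_append]
      simp only [List.foldl_cons, List.foldl_nil]
      by_cases h : i = m
      · subst h
        exact List.getElem?_set_self (by rw [foldl_set_length]; exact hlt)
      · have hfne : f m ≠ f i := fun he =>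
          h ((hinj m i (Nat.lt_succ_self m) hi he).symm)
        rw [List.getElem?_set_ne hfne]
        exact ih out (Nat.lt_of_le_of_ne (Nat.le_of_lt_succ hi) h)
          (fun a b ha hb => hinj a b (Nat.lt_succ_of_lt ha) (Nat.lt_succ_of_lt hb)) hlt

theorem foldl_length_inv {α β : Type} (f : List β → α → List β) (L : List α) (init : List β)
    (h : ∀ s a, (f s a).length = s.length) : (L.foldl f init).length = init.length := by
  induction L generalizing init with
  | nil => rfl
  | cons a t ih => simp only [List.foldl_cons]; rw [ih (f init a), h]

theorem foldl_congr_P {α β : Type} (P : β → Prop) (f g : β → α → β) (L : List α) (init : β)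
    (hP : P init) (h : ∀ s a, a ∈ L → P s → f s a = g s a ∧ P (f s a)) :
    L.foldl f init = L.foldl g init := by
  induction L generalizing init with
  | nil => rfl
  | cons a t ih =>
      simp only [List.foldl_cons]
      obtain ⟨he, hp⟩ := h init a (List.mem_cons_self) hP
      rw [← he]
      exact ih (f init a) hp (fun s b hb hs => h s b (List.mem_cons_of_mem a hb) hs)

theorem invert_perm_getD (q : List Int) (hnd : q.Nodup)
    (hrange : ∀ p ∈ q, 0 ≤ p ∧ p < (q.length : Int))
    (i : Nat) (hi : i < q.length) :
    (invert_perm q).getD (q.getD i 0).toNat 0 = (i : Int) := by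
  unfold invert_perm
  rw [PySem.List.enumerate_eq_map_pyRange q 0, List.foldl_map]
  rw [show PySem.List.len q = ((q.length : Nat) : Int) from by simp [PySem.List.len_eq]]
  rw [PySem.List.pyRange_zero_natCast, List.foldl_map]
  rw [PySem.List.foldl_congr_mem _ _
      (fun o (k : Nat) => o.set (q.getD k 0).toNat (k : Int)) _
      (by
        intro acc k hk
        have hk' : k < q.length := List.mem_range.mp hk
        have hmem : q.getD k 0 ∈ q := by
          rw [List.getD_eq_getElem q 0 hk']; exact List.getElem_mem hk'
        simp only [PySem.List.pyGetD_natCast]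
        exact PySem.List.pySetD_of_nonneg acc ((k : Int)) (hrange _ hmem).1)]
  have hset := foldl_set_hit q.length (fun k => (q.getD k 0).toNat) (fun k : Nat => (k : Int))
      (List.replicate q.length 0) i hi
      (by
        intro a b ha hb hab
        have hga : q.getD a 0 = q[a] := List.getD_eq_getElem q 0 ha
        have hgb : q.getD b 0 = q[b] := List.getD_eq_getElem q 0 hb
        have h0a := (hrange q[a] (List.getElem_mem ha)).1
        have h0b := (hrange q[b] (List.getElem_mem hb)).1
        simp only [hga, hgb] at hab
        have : q[a] = q[b] := by omega
        exact (List.Nodup.getElem_inj_iff hnd).mp this)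
      (by
        have hmem : q.getD i 0 ∈ q := by
          rw [List.getD_eq_getElem q 0 hi]; exact List.getElem_mem hi
        have := hrange _ hmem
        simp only [List.length_replicate]
        omega)
  rw [List.getD_eq_getElem?_getD, hset]
  rfl

theorem inner_block_eq (l : List Char) (q : List Int)
    (hq : q.Perm ((List.range 24).map (fun k : Nat => (k : Int))))
    (out : List Char) (hlen : out.length = l.length)
    (b : Int) (hb0 : 0 ≤ b) (hbase : b.toNat + 24 ≤ l.length) :
    (List.range 24).foldl (fun o (jn : Nat) =>
        if b + PySem.List.pyGetD (invert_perm q) (jn : Int) 0 < (l.length : Int) then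
          PySem.List.pySetD o (b + (jn : Int))
            (PySem.List.pyGetD l (b + PySem.List.pyGetD (invert_perm q) (jn : Int) 0) ' ')
        else o) out
    = (List.range 24).foldl (fun o (i : Nat) =>
        PySem.List.pySetD o (b + PySem.List.pyGetD q (i : Int) 0)
          (PySem.List.pyGetD l (b + (i : Int)) ' ')) out := by
  obtain ⟨base, rfl⟩ : ∃ m : Nat, b = (m : Int) := ⟨b.toNat, (Int.toNat_of_nonneg hb0).symm⟩
  rw [Int.toNat_natCast] at hbase
  have hlq : q.length = 24 := by simpa using hq.length_eq
  have hmemq : ∀ p ∈ q, 0 ≤ p ∧ p < 24 := by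
    intro p hp
    obtain ⟨k, hk, rfl⟩ := List.mem_map.mp (hq.mem_iff.mp hp)
    have hk' := List.mem_range.mp hk
    constructor
    · exact Int.natCast_nonneg k
    · exact_mod_cast hk' 
  have hrange' : ∀ p ∈ q, 0 ≤ p ∧ p < (q.length : Int) := by
    intro p hp; rw [hlq]; exact_mod_cast hmemq p hp
  have hnd : q.Nodup := by
    have h1 : ((List.range 24).map (fun k : Nat => (k : Int))).Nodup :=
      List.Nodup.map (fun a b h => by exact_mod_cast h) List.nodup_range
    exact hq.nodup_iff.mpr h1
  have hsurj : ∀ j : Nat, j < 24 → ∃ i, i < 24 ∧ q.getD i 0 = (j : Int) := by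
    intro j hj
    have hmem : (j : Int) ∈ q :=
      hq.mem_iff.mpr (List.mem_map.mpr ⟨j, List.mem_range.mpr hj, rfl⟩)
    obtain ⟨i, hi, hqi⟩ := List.getElem_of_mem hmem
    exact ⟨i, by omega, by rw [List.getD_eq_getElem q 0 hi, hqi]⟩
  have hinv : ∀ i, i < 24 → (invert_perm q).getD (q.getD i 0).toNat 0 = (i : Int) := by
    intro i hi
    exact invert_perm_getD q hnd hrange' i (by omega)
  have hinvb : ∀ j : Nat, j < 24 → 0 ≤ (invert_perm q).getD j 0 ∧ (invert_perm q).getD j 0 < 24 := by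
    intro j hj
    obtain ⟨i, hi, hqi⟩ := hsurj j hj
    have hjt : (q.getD i 0).toNat = j := by rw [hqi]; exact Int.toNat_natCast j
    have := hinv i hi
    rw [hjt] at this
    rw [this]
    omega
  have hBmem : ∀ i : Nat, i < 24 → 0 ≤ q.getD i 0 ∧ q.getD i 0 < 24 := by
    intro i hi
    have hi' : i < q.length := by omega
    have : q.getD i 0 ∈ q := by
      rw [List.getD_eq_getElem q 0 hi']; exact List.getElem_mem hi'
    exact hmemq _ this
  -- normalise the A-side inner loop to a plain set-fold
  conv_lhs => rw [PySem.List.foldl_congr_mem _ _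
      (fun o (jn : Nat) => o.set (base + jn)
        (l.getD (base + ((invert_perm q).getD jn 0).toNat) ' ')) _
      (by
        intro acc jn hjn
        have hjn' : jn < 24 := List.mem_range.mp hjn
        obtain ⟨hv0, hv24⟩ := hinvb jn hjn'
        simp only [PySem.List.pyGetD_natCast]
        rw [if_pos (by omega)]
        rw [show (base : Int) + (jn : Int) = ((base + jn : Nat) : Int) by push_cast; ring]
        rw [show (base : Int) + (invert_perm q).getD jn 0
              = (((base + ((invert_perm q).getD jn 0).toNat : Nat)) : Int) by push_cast; omega]
        rw [PySem.List.pySetD_natCast, PySem.List.pyGetD_natCast])]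
  -- normalise the B-side inner loop to a plain set-fold
  conv_rhs => rw [PySem.List.foldl_congr_mem _ _
      (fun o (i : Nat) => o.set (base + (q.getD i 0).toNat)
        (l.getD (base + i) ' ')) _
      (by
        intro acc i hi
        have hi' : i < 24 := List.mem_range.mp hi
        obtain ⟨hp0, hp24⟩ := hBmem i hi'
        simp only [PySem.List.pyGetD_natCast]
        rw [show (base : Int) + q.getD i 0
              = (((base + (q.getD i 0).toNat : Nat)) : Int) by push_cast; omega]
        rw [show (base : Int) + (i : Int) = ((base + i : Nat) : Int) by push_cast; ring]
        rw [PySem.List.pySetD_natCast, PySem.List.pyGetD_natCast])]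
  -- both sides are scatter folds over disjoint positions: compare pointwise
  apply List.ext_getElem?
  intro k
  have hlenA := foldl_set_length 24 (fun jn => base + jn)
      (fun jn => l.getD (base + ((invert_perm q).getD jn 0).toNat) ' ') out
  have hlenB := foldl_set_length 24 (fun i => base + (q.getD i 0).toNat)
      (fun i => l.getD (base + i) ' ') out
  have hinjB : ∀ a c, a < 24 → c < 24 →
      (fun i => base + (q.getD i 0).toNat) a = (fun i => base + (q.getD i 0).toNat) c → a = c := by
    intro a c ha hc hac
    simp only [] at hac
    obtain ⟨h0a, h24a⟩ := hBmem a ha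
    obtain ⟨h0c, h24c⟩ := hBmem c hc
    have : q.getD a 0 = q.getD c 0 := by omega
    rw [List.getD_eq_getElem q 0 (by omega), List.getD_eq_getElem q 0 (by omega)] at this
    exact (List.Nodup.getElem_inj_iff hnd).mp this
  by_cases hk : base ≤ k ∧ k < base + 24
  · obtain ⟨j, hj, rfl⟩ : ∃ j, j < 24 ∧ k = base + j := ⟨k - base, by omega, by omega⟩
    have hA := foldl_set_hit 24 (fun jn => base + jn)
        (fun jn => l.getD (base + ((invert_perm q).getD jn 0).toNat) ' ') out j hj
        (by intro a c _ _ h; simpa using h) (by simp only []; omega)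
    simp only [] at hA
    rw [hA]
    obtain ⟨i, hi, hqi⟩ := hsurj j hj
    have hB := foldl_set_hit 24 (fun i => base + (q.getD i 0).toNat)
        (fun i => l.getD (base + i) ' ') out i hi hinjB
        (by simp only []; obtain ⟨h0, h24⟩ := hBmem i hi; omega)
    simp only [] at hB
    rw [show base + (q.getD i 0).toNat = base + j from by rw [hqi]; simp] at hB
    rw [hB]
    have hjt : (q.getD i 0).toNat = j := by rw [hqi]; exact Int.toNat_natCast j
    have hval := hinv i hi
    rw [hjt] at hval
    rw [hval, Int.toNat_natCast]
  · rw [foldl_set_miss 24 _ _ out k (by intro i hi; omega),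
        foldl_set_miss 24 _ _ out k (by
          intro i hi
          obtain ⟨h0, h24⟩ := hBmem i hi
          omega)]

-- ===== VERDICT (by name: the statement is the Claim_ definition above) =====
theorem unmask_block_transposition_spec : Claim_equal_unmask_block_transposition := by
  intro ct perm cycle_boustro hdom hpre
  obtain ⟨hidx, hperm⟩ := hpre
  unfold Spec_unmask_block_transposition
  unfold unmask_block_transposition unmask_block_transposition_alt
  simp only [PySem.Str.len_eq]
  rw [show PySem.Int.floordiv (↑ct.toList.length) 24 = ((ct.toList.length / 24 : Nat) : Int) from by
    exact_mod_cast PySem.Int.floordiv_natCast ct.toList.length 24]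
  have hr24 : PySem.List.pyRange 0 24 1 = (List.range 24).map (fun k : Nat => (k : Int)) := by
    rw [show (24 : Int) = ((24 : Nat) : Int) from rfl]
    exact PySem.List.pyRange_zero_natCast 24
  simp only [PySem.List.pyRange_zero_natCast, List.foldl_map]
  apply congrArg
  apply foldl_congr_P (fun s => s.length = ct.toList.length) _ _ _ _ rfl
  intro s bn hbn hs
  have hbn' : bn < ct.toList.length / 24 := List.mem_range.mp hbn
  have h24 : 24 ≤ ct.toList.length := by omega
  have hbase : bn * 24 + 24 ≤ ct.toList.length := by omega
  have hb0 : (0 : Int) ≤ (bn : Int) * 24 := by positivity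
  have hbase' : ((bn : Int) * 24).toNat + 24 ≤ ct.toList.length := by
    have : ((bn : Int) * 24).toNat = bn * 24 := by omega
    omega
  have hkey : ∀ q : List Int, q.Perm ((List.range 24).map (fun k : Nat => (k : Int))) →
      (List.range 24).foldl (fun o (jn : Nat) =>
          if (bn : Int) * 24 + PySem.List.pyGetD (invert_perm q) (jn : Int) 0 < (ct.toList.length : Int) then
            PySem.List.pySetD o ((bn : Int) * 24 + (jn : Int))
              (PySem.List.pyGetD ct.toList ((bn : Int) * 24 + PySem.List.pyGetD (invert_perm q) (jn : Int) 0) ' ')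
          else o) s
      = (List.range 24).foldl (fun o (i : Nat) =>
          PySem.List.pySetD o ((bn : Int) * 24 + PySem.List.pyGetD q (i : Int) 0)
            (PySem.List.pyGetD ct.toList ((bn : Int) * 24 + (i : Int)) ' ')) s :=
    fun q hq => inner_block_eq ct.toList q hq s hs ((bn : Int) * 24) hb0 hbase'
  by_cases hcb : (cycle_boustro && (PySem.Int.mod (bn : Int) 2 == 1)) = true
  · simp only [hcb, reduceIte, hr24, List.foldl_map]
    constructor
    · exact hkey perm.reverse ((List.reverse_perm perm).trans (hperm h24))
    · rw [hkey perm.reverse ((List.reverse_perm perm).trans (hperm h24))]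
      rw [foldl_length_inv _ _ _ (fun s' a => PySem.List.length_pySetD s' _ _)]
      exact hs
  · simp only [Bool.not_eq_true] at hcb
    simp only [hcb, Bool.false_eq_true, reduceIte, hr24, List.foldl_map]
    constructor
    · exact hkey perm (hperm h24)
    · rw [hkey perm (hperm h24)]
      rw [foldl_length_inv _ _ _ (fun s' a => PySem.List.length_pySetD s' _ _)]
      exact hs
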